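-- pv_equiv track=rewrite | github.com/SteffenSunde/aoc_2018_py | aoc_2018_py/day02.py | count_twos_and_threes
-- ===== SOURCE A (Python) =====
-- def count_twos_and_threes(s: str):
--     characters = {}
--     for char in s:
--         if char in characters:
--             characters[char] += 1
--         else:
--             characters[char] = 1
--     two = len([k for k, v in characters.items() if v == 2]) > 0
--     three = len([k for k, v in characters.items() if v == 3]) > 0
--     return (two, three)
-- ===== SOURCE B (Python) =====
-- def count_twos_and_threes(s: str):
--     # Sort-then-scan: after sorting, equal characters form contiguous runs.
--     # Walk the sorted string once, measure each run's length, and flag 2s and 3s.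
--     t = sorted(s)
--     two = three = False
--     i = 0
--     n = len(t)
--     while i < n:
--         j = i
--         while j < n and t[j] == t[i]:
--             j += 1
--         run = j - i
--         if run == 2:
--             two = True
--         elif run == 3:
--             three = True
--         i = j
--     return (two, three)
-- ===== Notes on version B (the rewrite author's own statement) =====
-- stated objective: alternative
-- what changed: B replaces A's hash-map frequency table plus two items() filter scans by a sort-then-scan: it sorts the string and walks the contiguous runs of equal characters once, flagging run lengths 2 and 3 on the fly.
import Mathlib
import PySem

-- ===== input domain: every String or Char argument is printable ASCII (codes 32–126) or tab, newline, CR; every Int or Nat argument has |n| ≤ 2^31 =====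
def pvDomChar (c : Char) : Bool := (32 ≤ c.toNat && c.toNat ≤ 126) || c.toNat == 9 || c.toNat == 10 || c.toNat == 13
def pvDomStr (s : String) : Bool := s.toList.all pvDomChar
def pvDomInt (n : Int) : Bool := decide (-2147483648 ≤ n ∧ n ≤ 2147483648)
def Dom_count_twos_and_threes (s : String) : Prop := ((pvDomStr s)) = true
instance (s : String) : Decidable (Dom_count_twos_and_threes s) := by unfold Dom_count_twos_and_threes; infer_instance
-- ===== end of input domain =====

-- B replaces A's dict-of-counts and its two items() scans by a sort-then-scan over the
-- contiguous runs of equal characters; objective: alternative algorithm, no speed claim.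

-- ===== PORT A =====
def count_twos_and_threes (s : String) : Bool × Bool :=
  let characters : PySem.Dict Char Int :=
    s.toList.foldl
      (fun d c =>
        if d.contains c then d.insert c (d.getD c 0 + 1)
        else d.insert c 1)
      PySem.Dict.empty
  let two := decide ((characters.items.filter (fun p => p.2 == (2 : Int))).length > 0)
  let three := decide ((characters.items.filter (fun p => p.2 == (3 : Int))).length > 0)
  (two, three)

-- ===== PORT B =====
-- The inner `while j < n and t[j] == t[i]` walk of Source B is the takeWhile/dropWhile split
-- of the run starting at position i; the outer while-loop is this structural recursion.
def pvScanRuns : List Char → Bool → Bool → Bool × Bool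
  | [], two, three => (two, three)
  | c :: rest, two, three =>
    let same := rest.takeWhile (fun x => x == c)
    let restr := rest.dropWhile (fun x => x == c)
    let run := 1 + same.length
    if run == 2 then pvScanRuns restr true three
    else if run == 3 then pvScanRuns restr two true
    else pvScanRuns restr two three
termination_by l => l.length
decreasing_by
  all_goals simpa using Nat.lt_succ_of_le (rest.length_dropWhile_le (fun x => x == c))


def count_twos_and_threes_alt (s : String) : Bool × Bool :=
  pvScanRuns (PySem.List.sorted s.toList (fun x => x) false) false false

-- ===== PRECONDITION & SPEC =====
def Spec_count_twos_and_threes (s : String) (out : Bool × Bool) : Prop := out = count_twos_and_threes_alt s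
instance (s : String) (out : Bool × Bool) : Decidable (Spec_count_twos_and_threes s out) := by unfold Spec_count_twos_and_threes; infer_instance

-- ===== CLAIM =====
def Claim_equal_count_twos_and_threes : Prop := ∀ (s : String), Dom_count_twos_and_threes s → Spec_count_twos_and_threes s (count_twos_and_threes s)

-- ===== LEMMAS AND PROOFS =====

-- A's loop body equals the canonical counter step: in the else branch getD is 0.
theorem pv_loop_eq_counter (cs : List Char) :
    cs.foldl
      (fun d c =>
        if d.contains c then d.insert c (d.getD c 0 + 1)
        else d.insert c (1 : Int))
      PySem.Dict.empty = PySem.Dict.counter cs := by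
  rw [← PySem.Dict.foldl_insert_getD_add_one_eq_counter]
  congr 1
  funext d c
  split_ifs with h
  · rfl
  · rw [PySem.Dict.getD_of_not_contains d 0 (by simpa using h)]
    norm_num

-- A's "some dict value equals v" test as a plain existential over the input.
theorem pv_a_side (cs : List Char) (v : Int) :
    decide ((((PySem.Dict.counter cs).items.filter (fun p => p.2 == v)).length) > 0)
      = decide (∃ c ∈ cs, (cs.count c : Int) = v) := by
  rw [PySem.Dict.items_counter, decide_eq_decide]
  simp [List.length_pos_iff, List.filter_eq_nil_iff, PySem.Set.mem_ofList]

theorem pvScanRuns_cons (c : Char) (rest : List Char) (two three : Bool) :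
  pvScanRuns (c :: rest) two three =
    (if 1 + (rest.takeWhile (fun x => x == c)).length == 2 then
       pvScanRuns (rest.dropWhile (fun x => x == c)) true three
     else if 1 + (rest.takeWhile (fun x => x == c)).length == 3 then
       pvScanRuns (rest.dropWhile (fun x => x == c)) two true
     else pvScanRuns (rest.dropWhile (fun x => x == c)) two three) := by
  rw [pvScanRuns]

theorem pv_not_mem_dropWhile (c : Char) (rest : List Char)
    (hp : (c :: rest).Pairwise (· ≤ ·)) :
    c ∉ rest.dropWhile (fun x => x == c) := by
  intro hmem
  cases hd : rest.dropWhile (fun x => x == c) with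
  | nil => simp [hd] at hmem
  | cons d tl =>
    have hne : rest.dropWhile (fun x => x == c) ≠ [] := by simp [hd]
    have hdne : ¬ d = c := by
      have := List.head_dropWhile_not (fun x => x == c) hne
      simpa [hd] using this
    have hdrest : ∀ x ∈ rest.dropWhile (fun x => x == c), x ∈ rest :=
      fun x hx => (rest.dropWhile_sublist (fun x => x == c)).mem hx
    have hcle : c ≤ d := (List.pairwise_cons.mp hp).1 d (hdrest d (by simp [hd]))
    have hlt : c < d := lt_of_le_of_ne hcle (fun h => hdne h.symm)
    rw [hd] at hmem
    rcases List.mem_cons.mp hmem with h | h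
    · exact absurd h (ne_of_lt hlt)
    · have hp' : (d :: tl).Pairwise (· ≤ ·) := by
        have := List.Pairwise.sublist (rest.dropWhile_sublist (fun x => x == c)) (List.pairwise_cons.mp hp).2
        rwa [hd] at this
      have : d ≤ c := (List.pairwise_cons.mp hp').1 c h
      exact absurd hlt (not_lt.mpr this)

theorem pv_scan_spec (l : List Char) (two three : Bool)
    (hp : l.Pairwise (· ≤ ·)) :
    pvScanRuns l two three =
      (two || decide (∃ c ∈ l, l.count c = 2), three || decide (∃ c ∈ l, l.count c = 3)) := by
  induction hn : l.length using Nat.strong_induction_on generalizing l two three with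
  | _ n ih =>
    cases l with
    | nil => simp [pvScanRuns]
    | cons c rest =>
      have hsplit : rest = rest.takeWhile (fun x => x == c) ++ rest.dropWhile (fun x => x == c) :=
        (rest.takeWhile_append_dropWhile (p := fun x => x == c)).symm
      have hsame_all : ∀ x ∈ rest.takeWhile (fun x => x == c), x = c := by
        intro x hx
        have := List.mem_takeWhile_imp hx
        simpa using this
      have hcnotr : c ∉ rest.dropWhile (fun x => x == c) := pv_not_mem_dropWhile c rest hp
      have hrestr_sub : (rest.dropWhile (fun x => x == c)).Sublist rest := rest.dropWhile_sublist _
      have hp' : (rest.dropWhile (fun x => x == c)).Pairwise (· ≤ ·) :=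
        List.Pairwise.sublist hrestr_sub (List.pairwise_cons.mp hp).2
      have hlen : (rest.dropWhile (fun x => x == c)).length < n := by
        have := rest.length_dropWhile_le (fun x => x == c)
        simp at hn; omega
      have hcount_same : (rest.takeWhile (fun x => x == c)).count c = (rest.takeWhile (fun x => x == c)).length :=
        List.count_eq_length.mpr (fun x hx => ((hsame_all x hx).symm ▸ rfl))
      have hcount_c : (c :: rest).count c = 1 + (rest.takeWhile (fun x => x == c)).length := by
        rw [List.count_cons_self]
        conv_lhs => rw [hsplit]
        rw [List.count_append, hcount_same, List.count_eq_zero_of_not_mem hcnotr]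
        omega
      have hcount_other : ∀ x, x ≠ c → (c :: rest).count x = (rest.dropWhile (fun x => x == c)).count x := by
        intro x hx
        rw [List.count_cons_of_ne (Ne.symm hx)]
        conv_lhs => rw [hsplit]
        rw [List.count_append, List.count_eq_zero_of_not_mem (fun hm => hx (hsame_all x hm))]
        omega
      have hex : ∀ v : Nat, (∃ x ∈ (c :: rest), (c :: rest).count x = v) ↔
          (1 + (rest.takeWhile (fun x => x == c)).length = v ∨
           ∃ x ∈ rest.dropWhile (fun x => x == c), (rest.dropWhile (fun x => x == c)).count x = v) := by
        intro v
        constructor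
        · rintro ⟨x, hxm, hxc⟩
          by_cases hxe : x = c
          · subst hxe; left; omega
          · right
            refine ⟨x, ?_, by rw [← hcount_other x hxe]; exact hxc⟩
            rcases List.mem_cons.mp hxm with h | h
            · exact absurd h hxe
            · rw [hsplit] at h
              rcases List.mem_append.mp h with h | h
              · exact absurd (hsame_all x h) hxe
              · exact h
        · rintro (h | ⟨x, hxm, hxc⟩)
          · exact ⟨c, by simp, by omega⟩
          · have hxc' : x ≠ c := fun he => hcnotr (he ▸ hxm)
            refine ⟨x, List.mem_cons_of_mem _ (hrestr_sub.mem hxm), ?_⟩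
            rw [hcount_other x hxc']; exact hxc
      have hih := fun two three => ih (rest.dropWhile (fun x => x == c)).length hlen
        (rest.dropWhile (fun x => x == c)) two three hp' rfl
      rw [pvScanRuns_cons]
      have e2 : decide (∃ x ∈ (c :: rest), (c :: rest).count x = 2)
          = (decide (1 + (rest.takeWhile (fun x => x == c)).length = 2)
             || decide (∃ x ∈ rest.dropWhile (fun x => x == c), (rest.dropWhile (fun x => x == c)).count x = 2)) := by
        rw [decide_eq_decide.mpr (hex 2)]
        by_cases hA : 1 + (rest.takeWhile (fun x => x == c)).length = 2 <;>
          by_cases hB : (∃ x ∈ rest.dropWhile (fun x => x == c), (rest.dropWhile (fun x => x == c)).count x = 2) <;>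
            simp [hA, hB]
        infer_instance
      have e3 : decide (∃ x ∈ (c :: rest), (c :: rest).count x = 3)
          = (decide (1 + (rest.takeWhile (fun x => x == c)).length = 3)
             || decide (∃ x ∈ rest.dropWhile (fun x => x == c), (rest.dropWhile (fun x => x == c)).count x = 3)) := by
        rw [decide_eq_decide.mpr (hex 3)]
        by_cases hA : 1 + (rest.takeWhile (fun x => x == c)).length = 3 <;>
          by_cases hB : (∃ x ∈ rest.dropWhile (fun x => x == c), (rest.dropWhile (fun x => x == c)).count x = 3) <;>
            simp [hA, hB]
        infer_instance
      by_cases hr2 : 1 + (rest.takeWhile (fun x => x == c)).length = 2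
      · have hr3 : ¬ 1 + (rest.takeWhile (fun x => x == c)).length = 3 := by omega
        rw [if_pos (by simpa using hr2), hih, e2, e3]
        simp [hr2]
      · by_cases hr3 : 1 + (rest.takeWhile (fun x => x == c)).length = 3
        · rw [if_neg (by simpa using hr2), if_pos (by simpa using hr3), hih, e2, e3]
          simp [hr3]
        · rw [if_neg (by simpa using hr2), if_neg (by simpa using hr3), hih, e2, e3]
          simp [hr2, hr3]

-- ===== VERDICT =====
theorem count_twos_and_threes_spec : Claim_equal_count_twos_and_threes := by
  intro s _
  unfold Spec_count_twos_and_threes count_twos_and_threes count_twos_and_threes_alt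
  have hperm : (PySem.List.sorted s.toList (fun x => x) false).Perm s.toList :=
    PySem.List.sorted_perm s.toList (fun x => x) false
  have hpw : (PySem.List.sorted s.toList (fun x => x) false).Pairwise (· ≤ ·) := by
    simpa using PySem.List.sorted_pairwise s.toList (fun x => x)
  rw [pv_scan_spec _ false false hpw]
  simp only [pv_loop_eq_counter, pv_a_side, Bool.false_or]
  rw [Prod.mk.injEq]
  constructor <;>
  · rw [decide_eq_decide]
    constructor
    · rintro ⟨c, hm, hc⟩
      exact ⟨c, hperm.mem_iff.mpr hm, by rw [hperm.count_eq]; exact_mod_cast hc⟩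
    · rintro ⟨c, hm, hc⟩
      exact ⟨c, hperm.mem_iff.mp hm, by rw [← hperm.count_eq]; exact_mod_cast hc⟩
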